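-- pv_equiv track=rewrite | github.com/lureevnat/python_code | unsga3_python-master/initweight.py | noweight
-- ===== SOURCE A (Python) =====
-- def noweight(unit, sum, dim):
--
--     M = 0;
--     if dim == 1:
--         M = 1;
--         return M
--     for i in range(0,(unit-sum)+1,1):
--         M = M + noweight(unit, sum + i, dim - 1);
--     return M
-- ===== SOURCE B (Python) =====
-- def noweight(unit, sum, dim):
--     # closed-form stars-and-bars count: C((unit-sum)+dim-1, dim-1),
--     # computed by an incremental binomial product
--     if dim == 1:
--         return 1
--     n = unit - sum
--     if n < 0:
--         return 0
--     r = 1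
--     for j in range(1, dim):
--         r = r * (n + j) // j
--     return r
-- ===== Notes on version B (the rewrite author's own statement) =====
-- stated objective: alternative
-- what changed: replaces the recursive stars-and-bars summation by a direct incremental binomial-coefficient product computing C(unit-sum+dim-1, dim-1)
import Mathlib
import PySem

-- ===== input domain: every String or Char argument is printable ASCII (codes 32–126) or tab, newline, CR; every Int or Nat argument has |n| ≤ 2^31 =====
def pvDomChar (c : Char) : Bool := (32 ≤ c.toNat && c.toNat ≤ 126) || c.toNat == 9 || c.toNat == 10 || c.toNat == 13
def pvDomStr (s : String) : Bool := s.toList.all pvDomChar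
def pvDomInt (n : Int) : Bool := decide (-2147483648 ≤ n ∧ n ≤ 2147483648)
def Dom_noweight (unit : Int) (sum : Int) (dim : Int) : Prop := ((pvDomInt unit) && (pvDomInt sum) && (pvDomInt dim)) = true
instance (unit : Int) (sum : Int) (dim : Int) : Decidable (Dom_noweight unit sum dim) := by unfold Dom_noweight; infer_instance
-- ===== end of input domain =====

-- B replaces A's recursive stars-and-bars summation by an incremental
-- binomial-coefficient product C(unit-sum+dim-1, dim-1) (objective: alternative).


-- ===== PORT A =====
mutual
-- literal port of A; the `dim < 1` guard is a totality guard only: there Python's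
-- range is empty (returns 0, matching) when unit < sum, and otherwise Python
-- recurses forever (excluded by Pre_noweight).
def noweight (unit : Int) (sum : Int) (dim : Int) : Int :=
  if dim = 1 then 1
  else if _h : dim < 1 then 0
  else noweightGo unit sum (dim - 1) (PySem.List.pyRange 0 ((unit - sum) + 1) 1) 0
termination_by (dim.toNat, 0)
decreasing_by apply Prod.Lex.left; omega
-- the `for i in range(...)` accumulation loop of A
def noweightGo (unit : Int) (sum : Int) (dim' : Int) : List Int → Int → Int
  | [], M => M
  | i :: rest, M => noweightGo unit sum dim' rest (M + noweight unit (sum + i) dim')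
termination_by l _ => (dim'.toNat, l.length + 1)
decreasing_by
  · apply Prod.Lex.right' <;> simp
  · apply Prod.Lex.right' <;> simp
end
-- ===== PORT B =====
def noweight_alt (unit : Int) (sum : Int) (dim : Int) : Int :=
  if dim = 1 then 1
  else
    let n := unit - sum
    if n < 0 then 0
    else (PySem.List.pyRange 1 dim 1).foldl (fun r j => PySem.Int.floordiv (r * (n + j)) j) 1

-- ===== PRECONDITION & SPEC =====
-- Pre_ excludes exactly the inputs (dim ≤ 0 with sum ≤ unit) on which A recurses
-- forever (RecursionError); A returns normally on every input satisfying Pre_.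
def Pre_noweight (unit : Int) (sum : Int) (dim : Int) : Prop := 1 ≤ dim ∨ unit < sum
instance (unit : Int) (sum : Int) (dim : Int) : Decidable (Pre_noweight unit sum dim) := by unfold Pre_noweight; infer_instance
def pvWitness_noweight : Int × Int × Int := (3, 0, 2)
def Spec_noweight (unit : Int) (sum : Int) (dim : Int) (out : Int) : Prop := out = noweight_alt unit sum dim
instance (unit : Int) (sum : Int) (dim : Int) (out : Int) : Decidable (Spec_noweight unit sum dim out) := by unfold Spec_noweight; infer_instance

-- ===== CLAIM (what is proved, stated in full; the proofs are below) =====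
def Claim_equal_noweight : Prop := ∀ (unit : Int) (sum : Int) (dim : Int), Dom_noweight unit sum dim → Pre_noweight unit sum dim → Spec_noweight unit sum dim (noweight unit sum dim)

-- ===== LEMMAS AND PROOFS =====

lemma noweightGo_spec (unit sum dim' : Int) (l : List Int) (M : Int) :
    noweightGo unit sum dim' l M = M + (l.map (fun i => noweight unit (sum + i) dim')).sum := by
  induction l generalizing M with
  | nil => simp [noweightGo]
  | cons i rest ih => rw [noweightGo, ih]; simp; ring

-- hockey stick, list form, summing C(N-k+d, d) for k = 0..N
lemma sum_choose_list (d N : Nat) :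
    ((List.range (N+1)).map (fun k => ((N - k) + d).choose d)).sum = (N + d + 1).choose (d+1) := by
  induction N with
  | zero => simp
  | succ N ih =>
    rw [List.range_succ_eq_map, List.map_cons, List.map_map, List.sum_cons]
    have he : ((fun k => ((N + 1 - k) + d).choose d) ∘ Nat.succ) = fun k => ((N - k) + d).choose d := by
      funext k; simp only [Function.comp]; congr 2; omega
    rw [he, ih]
    have hp : (N + 1 + d + 1).choose (d + 1) = (N + 1 + d).choose d + (N + 1 + d).choose (d+1) :=
      Nat.choose_succ_succ (N + 1 + d) d
    simp only [Nat.sub_zero]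
    rw [show N + d + 1 = N + 1 + d from by omega]
    omega

-- characterisation of A's recursion for dim = d + 1 ≥ 1
lemma noweight_char (d : Nat) (unit sum : Int) :
    noweight unit sum ((d : Int) + 1) =
      if 0 ≤ unit - sum then ((((unit - sum).toNat + d).choose d : Nat) : Int)
      else if d = 0 then 1 else 0 := by
  induction d generalizing sum with
  | zero => rw [noweight]; simp
  | succ d ih =>
    rw [noweight, if_neg (by omega), dif_neg (by omega)]
    have hdim : ((d.succ : Int) + 1) - 1 = (d : Int) + 1 := by push_cast; ring
    rw [hdim, noweightGo_spec]
    by_cases hn : 0 ≤ unit - sum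
    · rw [if_pos hn, PySem.List.pyRange_one, List.map_map]
      have hN : (unit - sum + 1 - 0).toNat = (unit - sum).toNat + 1 := by omega
      rw [hN]
      have hmap : (List.range ((unit - sum).toNat + 1)).map
            ((fun i => noweight unit (sum + i) ((d : Int) + 1)) ∘ (fun k : Nat => (0 : Int) + k))
          = (List.range ((unit - sum).toNat + 1)).map
            (fun k => (((((unit - sum).toNat - k) + d).choose d : Nat) : Int)) := by
        apply List.map_congr_left
        intro k hk
        rw [List.mem_range] at hk
        simp only [Function.comp, zero_add]
        rw [ih (sum + (k : Int))]
        have hk' : (0 : Int) ≤ unit - (sum + k) := by omega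
        rw [if_pos hk']
        congr 2
        omega
      rw [hmap]
      have := sum_choose_list d ((unit - sum).toNat)
      have hc : (List.range ((unit - sum).toNat + 1)).map
            (fun k => (((((unit - sum).toNat - k) + d).choose d : Nat) : Int))
          = ((List.range ((unit - sum).toNat + 1)).map
            (fun k => (((unit - sum).toNat - k) + d).choose d)).map (fun m : Nat => (m : Int)) := by
        rw [List.map_map]; rfl
      rw [hc, ← Nat.cast_list_sum, this]
      norm_cast
      simp [Nat.add_assoc]
    · rw [if_neg hn, PySem.List.pyRange_one_eq_nil (by omega)]
      simp

-- characterisation of B's product loop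
lemma alt_loop (n : Int) (hn : 0 ≤ n) (d : Nat) :
    (PySem.List.pyRange 1 ((d : Int) + 1) 1).foldl
        (fun r j => PySem.Int.floordiv (r * (n + j)) j) 1
      = (((n.toNat + d).choose d : Nat) : Int) := by
  induction d with
  | zero => rw [PySem.List.pyRange_one_eq_nil (by omega)]; simp
  | succ d ih =>
    have hsplit : ((d.succ : Int) + 1) = ((d : Int) + 1) + 1 := by push_cast; ring
    rw [hsplit, PySem.List.pyRange_one_succ_right (by omega), List.foldl_append, ih]
    simp only [List.foldl_cons, List.foldl_nil]
    have hnn : n = ((n.toNat : Nat) : Int) := (Int.toNat_of_nonneg hn).symm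
    have key : (n.toNat + d).choose d * (n.toNat + d + 1) = (n.toNat + d + 1).choose (d+1) * (d+1) := by
      have h := Nat.add_one_mul_choose_eq (n.toNat + d) d
      simp at h
      calc (n.toNat + d).choose d * (n.toNat + d + 1)
          = (n.toNat + d + 1) * (n.toNat + d).choose d := by ring
        _ = (n.toNat + d + 1).choose (d+1) * (d+1) := by rw [h]
    have harg : ((((n.toNat + d).choose d : Nat) : Int)) * (n + ((d : Int) + 1))
        = (((((n.toNat + d + 1).choose (d+1)) * (d+1) : Nat)) : Int) := by
      have hn2 : n + ((d : Int) + 1) = (((n.toNat + d + 1 : Nat)) : Int) := by omega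
      rw [hn2, ← Nat.cast_mul, key]
    rw [harg]
    have hstep : ((d : Int) + 1) = (((d + 1 : Nat)) : Int) := by push_cast; ring
    rw [hstep, PySem.Int.floordiv_natCast, Nat.mul_div_cancel _ (by omega)]
    simp [Nat.add_assoc]

-- ===== VERDICT (by name: the statement is the Claim_ definition above) =====
theorem noweight_spec : Claim_equal_noweight := by
  intro unit sum dim _ hpre
  unfold Spec_noweight
  by_cases h1 : dim = 1
  · rw [noweight, noweight_alt]; simp [h1]
  · by_cases h2 : dim < 1
    · have hlt : unit < sum := by rcases hpre with h | h <;> omega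
      rw [noweight, if_neg h1, dif_pos h2]
      simp [noweight_alt, h1, show unit - sum < 0 from by omega]
    · set d : Nat := (dim - 1).toNat with hdef
      have hd : dim = (d : Int) + 1 := by omega
      have hd1 : 1 ≤ d := by omega
      rw [hd, noweight_char]
      simp only [noweight_alt]
      rw [if_neg (show ¬ ((d : Int) + 1 = 1) from by omega)]
      by_cases hn : unit - sum < 0
      · rw [if_pos hn, if_neg (show ¬ ((0:Int) ≤ unit - sum) from by omega),
            if_neg (show ¬ (d = 0) from by omega)]
      · rw [if_neg hn, if_pos (show (0:Int) ≤ unit - sum from by omega),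
            alt_loop (unit - sum) (by omega)]
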